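-- pv_equiv track=rewrite | github.com/RyanKor/javascript-datastructure-and-algorithms | webtoon/webtoon3.py | solution
-- ===== SOURCE A (Python) =====
-- def solution(letters, k):
--     answer = ''
--     temp = sorted(letters)[::-1]
--     temp = temp[:k]
--     for i in letters:
--         if i not in temp:
--             letters = letters.replace(i, "")
--     return letters
-- ===== SOURCE B (Python) =====
-- from collections import Counter
--
-- def solution(letters, k):
--     cnt = Counter(letters)
--     keep = set()
--     greater = 0  # number of characters strictly greater than the current one
--     for ch in sorted(cnt, reverse=True):
--         if greater >= k:
--             break
--         keep.add(ch)
--         greater += cnt[ch]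
--     return ''.join(c for c in letters if c in keep)
-- ===== Notes on version B (the rewrite author's own statement) =====
-- stated objective: faster
-- what changed: B replaces A's sort-slice-and-repeated-str.replace scheme by a frequency Counter walked from the largest distinct character with a cumulative strictly-greater threshold, then one filtering pass over the string.
-- outside the precondition, e.g. on solution('ba', -1): A returns 'b', B returns ''
import Mathlib
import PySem

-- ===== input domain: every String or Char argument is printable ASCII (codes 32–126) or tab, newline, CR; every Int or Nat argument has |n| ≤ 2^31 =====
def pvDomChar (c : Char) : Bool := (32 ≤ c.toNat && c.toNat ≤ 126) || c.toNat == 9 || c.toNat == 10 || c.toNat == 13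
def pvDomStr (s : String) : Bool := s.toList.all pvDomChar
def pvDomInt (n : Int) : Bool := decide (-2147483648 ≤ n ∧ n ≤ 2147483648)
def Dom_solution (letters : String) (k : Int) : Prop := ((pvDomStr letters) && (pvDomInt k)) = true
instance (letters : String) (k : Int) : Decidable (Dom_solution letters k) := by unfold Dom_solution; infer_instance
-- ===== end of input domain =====

-- B keeps the characters among the k largest via a frequency counter and a cumulative
-- strictly-greater threshold plus one filtering pass, instead of A's sort-slice-and-repeated-
-- str.replace scheme; measurably faster (A does up to n full replace passes).


-- ===== PORT A =====
-- literal transliteration of A ('answer = "" ' is dead code in A and carries over as a dead let)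
def solution (letters : String) (k : Int) : String :=
  let answer := ""
  let temp := PySem.List.sorted letters.toList (fun x => x) false        -- sorted(letters)
  let temp := (PySem.List.slice? temp none none (-1)).getD []           -- [::-1] (step -1 never raises)
  let temp := PySem.List.slice temp none (some k)                        -- temp[:k]
  let _ := answer
  letters.toList.foldl                                                   -- for i in letters (the original string)
    (fun ls i => if !(temp.contains i) then PySem.Str.replace ls (String.ofList [i]) "" else ls)
    letters

-- ===== PORT B =====
-- the 'for ch in sorted(cnt, reverse=True): if greater >= k: break; keep.add(ch); greater += cnt[ch]' loop
def buildKeep (cnt : PySem.Dict Char Int) (k : Int) : List Char → Int → PySem.Set Char → PySem.Set Char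
  | [], _, keep => keep
  | ch :: rest, greater, keep =>
    if greater ≥ k then keep
    else buildKeep cnt k rest (greater + cnt.getD ch 0) (PySem.Set.add keep ch)

def solution_alt (letters : String) (k : Int) : String :=
  let cnt := PySem.Dict.counter letters.toList
  let keep := buildKeep cnt k (PySem.List.sorted cnt.keys (fun x => x) true) 0 PySem.Set.empty
  String.ofList (letters.toList.filter (fun c => PySem.Set.contains keep c))   -- ''.join(c for c in letters if c in keep)

-- ===== PRECONDITION & SPEC =====
-- Pre_ excludes negative k with |k| < len(letters), a corner no caller of a 'keep the k largest
-- characters' helper would specify: there Python's negative-slice convention makes A keep all but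
-- the |k| smallest sorted characters, while B (counting down from the largest) keeps none; both
-- readings are defensible. For all other k (including k <= -len) A and B agree and are covered.
def Pre_solution (letters : String) (k : Int) : Prop := 0 ≤ k ∨ (letters.toList.length : Int) + k ≤ 0
instance (letters : String) (k : Int) : Decidable (Pre_solution letters k) := by unfold Pre_solution; infer_instance
def pvWitness_solution : String × Int := ("banana", 3)
def Spec_solution (letters : String) (k : Int) (out : String) : Prop := out = solution_alt letters k
instance (letters : String) (k : Int) (out : String) : Decidable (Spec_solution letters k out) := by unfold Spec_solution; infer_instance

-- ===== CLAIM (what is proved, stated in full; the proofs are below) =====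
def Claim_equal_solution : Prop := ∀ (letters : String) (k : Int), Dom_solution letters k → Pre_solution letters k → Spec_solution letters k (solution letters k)

-- ===== LEMMAS AND PROOFS =====

-- Python's s.replace(c, '') on a single character c is exactly a filter.
lemma replace_go_single (i : Char) : ∀ (fuel : Nat) (l acc : List Char), l.length ≤ fuel →
    PySem.Chars.replace.go [i] [] fuel l acc = acc.reverse ++ l.filter (fun c => !(c == i)) := by
  intro fuel
  induction fuel with
  | zero =>
    intro l acc h
    have : l = [] := List.eq_nil_of_length_eq_zero (Nat.le_zero.mp h)
    subst this
    rw [PySem.Chars.replace.go]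
    simp
  | succ n ih =>
    intro l acc h
    cases l with
    | nil =>
      rw [PySem.Chars.replace.go]
      simp
      omega
    | cons c t =>
      have ht : t.length ≤ n := by simpa using Nat.le_of_succ_le_succ h
      by_cases hc : c = i
      · subst hc
        rw [PySem.Chars.replace.go]
        simp only [List.isPrefixOf, beq_self_eq_true, Bool.true_and, if_true, List.length_cons, List.length_nil, List.drop_succ_cons, List.drop_zero,
          List.reverse_nil, List.nil_append]
        rw [ih t acc ht]
        simp
      · have hpre : List.isPrefixOf [i] (c :: t) = false := by
          simp [List.isPrefixOf]
          exact fun h' => hc h'.symm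
        rw [PySem.Chars.replace.go]
        simp only [hpre]
        rw [ih t (c :: acc) ht]
        simp [hc]

lemma replace_single (s : String) (i : Char) :
    (PySem.Str.replace s (String.ofList [i]) "").toList = s.toList.filter (fun c => !(c == i)) := by
  rw [PySem.Str.toList_replace, String.toList_ofList]
  have hnil : ("" : String).toList = ([] : List Char) := rfl
  rw [hnil, PySem.Chars.replace]
  simp only [List.isEmpty_cons]
  exact replace_go_single i s.toList.length s.toList [] (le_refl _)

-- A's replace loop over the original string filters the state down to
-- the characters that are in temp or never occur in the iterated string.
lemma foldA (temp : List Char) : ∀ (orig : List Char) (s : String),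
    (orig.foldl (fun ls i => if !(temp.contains i) then PySem.Str.replace ls (String.ofList [i]) "" else ls) s).toList
      = s.toList.filter (fun c => temp.contains c || !(orig.contains c)) := by
  intro orig
  induction orig with
  | nil => intro s; simp
  | cons i rest ih =>
    intro s
    simp only [List.foldl_cons]
    by_cases hi : temp.contains i = true
    · have him : i ∈ temp := by simpa using hi
      rw [if_neg (by simp [him]), ih]
      apply List.filter_congr
      intro x _
      by_cases hx : x = i
      · subst hx; simp [him]
      · simp [hx]
    · have him : i ∉ temp := by simpa using hi
      rw [if_pos (by simp [him]), ih, replace_single, List.filter_filter]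
      apply List.filter_congr
      intro x _
      by_cases hx : x = i
      · subst hx; simp [him]
      · simp [hx]

-- membership in the first n entries of a descending-sorted list = fewer than n strictly greater entries
lemma mem_take_desc : ∀ (desc : List Char), desc.Pairwise (fun a b => b ≤ a) → ∀ (n : Nat) (c : Char),
    (c ∈ desc.take n ↔ c ∈ desc ∧ desc.countP (fun x => decide (c < x)) < n) := by
  intro desc
  induction desc with
  | nil => intro _ n c; simp
  | cons d t ih =>
    intro hp n c
    have ht : t.Pairwise (fun a b => b ≤ a) := hp.of_cons
    have hle : ∀ x ∈ t, x ≤ d := fun x hx => List.rel_of_pairwise_cons hp hx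
    cases n with
    | zero => simp
    | succ m =>
      simp only [List.take_succ_cons, List.mem_cons, List.countP_cons]
      by_cases hc : c = d
      · subst hc
        have h0 : t.countP (fun x => decide (c < x)) = 0 := by
          apply List.countP_eq_zero.mpr
          intro x hx
          simpa using not_lt.mpr (hle x hx)
        simp [h0]
      · rw [ih ht m c]
        by_cases hct : c ∈ t
        · have hcd : c < d := lt_of_le_of_ne (hle c hct) hc
          simp [hc, hct, hcd]
        · simp [hc, hct]

-- removing the head key from the not-yet-processed set adds exactly its multiplicity
lemma countP_not_contains_cons (L : List Char) (a : Char) (rest : List Char) (ha : a ∉ rest) :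
    L.countP (fun x => !(rest.contains x))
      = L.countP (fun x => !((a :: rest).contains x)) + L.count a := by
  induction L with
  | nil => simp
  | cons y t ih =>
    rw [List.countP_cons, List.countP_cons, List.count_cons, ih]
    by_cases hy : y = a
    · subst hy
      have h1 : (!(rest.contains y)) = true := by simp [List.contains_eq_mem, ha]
      have h2 : (!((y :: rest).contains y)) = false := by simp
      have h3 : (y == y) = true := by simp
      rw [h1, h2, h3]
      simp
      omega
    · have h3 : (y == a) = false := by simp [hy]
      have h4 : ((a :: rest).contains y) = rest.contains y := by
        simp [hy]
      rw [h3, h4]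
      simp
      omega

-- the loop of B keeps exactly the characters with strictly-greater count < k
lemma buildKeep_mem (L : List Char) (k : Int) :
    ∀ (ks : List Char) (keep : PySem.Set Char) (c : Char),
    ks.Pairwise (fun a b => b < a) →
    (∀ x ∈ ks, x ∈ L) →
    (∀ x ∈ L, x ∉ ks → ∀ a ∈ ks, a < x) →
    (c ∈ buildKeep (PySem.Dict.counter L) k ks ((L.countP (fun x => !(ks.contains x)) : Nat) : Int) keep
      ↔ c ∈ keep ∨ (c ∈ ks ∧ ((L.countP (fun x => decide (c < x)) : Nat) : Int) < k)) := by
  intro ks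
  induction ks with
  | nil => intro keep c _ _ _; simp [buildKeep]
  | cons a rest ih =>
    intro keep c hpair hmem hgt
    have hrest_lt : ∀ x ∈ rest, x < a := fun x hx => List.rel_of_pairwise_cons hpair hx
    have hanotin : a ∉ rest := fun h => lt_irrefl a (hrest_lt a h)
    have hg : L.countP (fun x => !((a :: rest).contains x)) = L.countP (fun x => decide (a < x)) := by
      apply List.countP_congr
      intro x hx
      simp only [Bool.not_eq_eq_eq_not, Bool.not_true, List.contains_eq_mem, decide_eq_false_iff_not,
        decide_eq_true_eq]
      constructor
      · intro hnx; exact hgt x hx hnx a (List.mem_cons_self ..)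
      · intro hax hmem'
        rcases List.mem_cons.mp hmem' with h | h
        · subst h; exact lt_irrefl x hax
        · exact absurd hax (not_lt.mpr (le_of_lt (hrest_lt x h)))
    by_cases hbreak : ((L.countP (fun x => !((a :: rest).contains x)) : Nat) : Int) ≥ k
    · simp only [buildKeep, if_pos hbreak]
      constructor
      · intro h; exact Or.inl h
      · rintro (h | ⟨hcm, hck⟩)
        · exact h
        · exfalso
          have hca : c ≤ a := by
            rcases List.mem_cons.mp hcm with h | h
            · exact le_of_eq h
            · exact le_of_lt (hrest_lt c h)
          have hmono : L.countP (fun x => decide (a < x)) ≤ L.countP (fun x => decide (c < x)) := by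
            apply List.countP_mono_left
            intro x _ hax
            simp only [decide_eq_true_eq] at hax ⊢
            exact lt_of_le_of_lt hca hax
          rw [hg] at hbreak
          omega
    · simp only [buildKeep, if_neg hbreak]
      have hcount : ((L.countP (fun x => !((a :: rest).contains x)) : Nat) : Int)
          + (PySem.Dict.counter L).getD a 0
          = ((L.countP (fun x => !(rest.contains x)) : Nat) : Int) := by
        rw [PySem.Dict.getD_counter, countP_not_contains_cons L a rest hanotin]
        push_cast
        ring
      rw [hcount, ih (PySem.Set.add keep a) c hpair.of_cons
        (fun x hx => hmem x (List.mem_cons_of_mem a hx))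
        (by
          intro x hx hnx b hb
          by_cases hxa : x = a
          · subst hxa; exact hrest_lt b hb
          · exact hgt x hx (by simp [hxa, hnx]) b (List.mem_cons_of_mem a hb))]
      rw [PySem.Set.mem_add]
      have hak : ((L.countP (fun x => decide (a < x)) : Nat) : Int) < k := by
        rw [hg] at hbreak; omega
      constructor
      · rintro (⟨h | h⟩ | ⟨h1, h2⟩)
        · exact Or.inl h
        · subst h; exact Or.inr ⟨List.mem_cons_self .., hak⟩
        · exact Or.inr ⟨List.mem_cons_of_mem a h1, h2⟩
      · rintro (h | ⟨h1, h2⟩)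
        · exact Or.inl (Or.inl h)
        · rcases List.mem_cons.mp h1 with h | h
          · exact Or.inl (Or.inr h)
          · exact Or.inr ⟨h, h2⟩

-- ===== VERDICT (by name: the statement is the Claim_ definition above) =====
theorem solution_spec : Claim_equal_solution := by
  intro letters k _ hpre
  unfold Spec_solution solution solution_alt
  simp only [PySem.List.slice?_none_none_neg_one, Option.getD_some]
  apply String.toList_inj.mp
  rw [foldA, String.toList_ofList]
  set L := letters.toList with hL
  set desc := (PySem.List.sorted L (fun x => x) false).reverse with hdesc
  have hperm : desc.Perm L := ((PySem.List.sorted_perm L (fun x => x) false).symm.trans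
    (List.reverse_perm _).symm).symm
  set ks := PySem.List.sorted (PySem.Dict.counter L).keys (fun x => x) true with hks
  by_cases hk : 0 ≤ k
  · -- the claimed region proper: k ≥ 0
    have hpd : desc.Pairwise (fun a b => b ≤ a) := by
      rw [hdesc, List.pairwise_reverse]
      exact PySem.List.sorted_pairwise L (fun x => x)
    have hslice : PySem.List.slice desc none (some k) = desc.take k.toNat :=
      PySem.List.slice_to desc hk
    have hkeys : (PySem.Dict.counter L).keys = PySem.Set.ofList L := PySem.Dict.keys_counter L
    have hks_perm : ks.Perm (PySem.Set.ofList L) := by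
      rw [hks, hkeys]; exact PySem.List.sorted_perm _ _ _
    have hks_nodup : ks.Nodup := hks_perm.nodup_iff.mpr (PySem.Set.nodup_ofList L)
    have hks_pair : ks.Pairwise (fun a b => b < a) := by
      have h1 : ks.Pairwise (fun a b => b ≤ a) := by
        rw [hks, hkeys]; exact PySem.List.sorted_pairwise_rev _ _
      have h2 : ks.Pairwise (fun a b => a ≠ b) := hks_nodup
      exact (h1.and h2).imp (fun ⟨hle, hne⟩ => lt_of_le_of_ne hle (Ne.symm hne))
    have hks_mem : ∀ x, x ∈ ks ↔ x ∈ L := by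
      intro x
      rw [hks_perm.mem_iff, PySem.Set.mem_ofList]
    have hzero : (0 : Int) = ((L.countP (fun x => !(ks.contains x)) : Nat) : Int) := by
      have : L.countP (fun x => !(ks.contains x)) = 0 := by
        apply List.countP_eq_zero.mpr
        intro x hx
        simp [List.contains_eq_mem, (hks_mem x).mpr hx]
      rw [this]; simp
    apply List.filter_congr
    intro x hx
    have hxL : x ∈ L := hx
    rw [hslice]
    have hA : (desc.take k.toNat).contains x
        = decide (((L.countP (fun y => decide (x < y)) : Nat) : Int) < k) := by
      simp only [List.contains_eq_mem, decide_eq_decide]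
      rw [mem_take_desc desc hpd k.toNat x, hperm.countP_eq, hperm.mem_iff]
      constructor
      · rintro ⟨_, h⟩; omega
      · intro h; exact ⟨hxL, by omega⟩
    have hB : PySem.Set.contains (buildKeep (PySem.Dict.counter L) k ks 0 PySem.Set.empty) x
        = decide (((L.countP (fun y => decide (x < y)) : Nat) : Int) < k) := by
      simp only [PySem.Set.contains, List.contains_eq_mem, decide_eq_decide]
      rw [hzero, buildKeep_mem L k ks PySem.Set.empty x hks_pair
        (fun y hy => (hks_mem y).mp hy)
        (fun y hy hny => absurd ((hks_mem y).mpr hy) hny)]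
      simp only [PySem.Set.empty, List.not_mem_nil, false_or]
      constructor
      · rintro ⟨_, h⟩; exact h
      · intro h; exact ⟨(hks_mem x).mpr hxL, h⟩
    rw [hA]
    show _ = PySem.Set.contains (buildKeep (PySem.Dict.counter L) k ks 0 PySem.Set.empty) x
    rw [hB]
    simp [List.contains_eq_mem, hxL]
  · -- k < 0 inside Pre_: then len(letters) + k ≤ 0 and both programs empty the string
    have hk' : k < 0 := not_le.mp hk
    have hlen : (L.length : Int) + k ≤ 0 := by
      rcases hpre with h | h
      · exact absurd h hk
      · exact h
    have hn : PySem.List.slice desc none (some k) = [] := by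
      have h1 : k = -(((-k).toNat : Nat) : Int) := by omega
      rw [h1, PySem.List.slice_to_neg_natCast desc (-k).toNat (by omega)]
      have hdlen : desc.length = L.length := hperm.length_eq
      have : desc.length ≤ (-k).toNat := by omega
      simp [Nat.sub_eq_zero_of_le this]
    have hkeep : buildKeep (PySem.Dict.counter L) k ks 0 PySem.Set.empty = PySem.Set.empty := by
      cases ks with
      | nil => rfl
      | cons a rest => simp [buildKeep, le_of_lt hk']
    rw [hn, hkeep]
    have h1 : L.filter (fun c => (List.contains ([] : List Char) c || !(L.contains c))) = [] := by
      apply List.filter_eq_nil_iff.mpr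
      intro a ha
      simp [List.contains_eq_mem, ha]
    have h2 : L.filter (fun c => PySem.Set.contains PySem.Set.empty c) = [] := by
      apply List.filter_eq_nil_iff.mpr
      intro a _
      simp [PySem.Set.contains, PySem.Set.empty]
    rw [h1, h2]
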